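-- pv_equiv track=rewrite | github.com/Novus-Engine/novuspack | scripts/lib/_validation_utils.py | get_subheadings
-- ===== SOURCE A (Python) =====
-- from typing import Optional, List, Set, Tuple, Dict
--
-- def get_subheadings(
--     heading_index: int,
--     heading_level: int,
--     all_headings: List[Tuple[int, int, str]],
--     hierarchy: Dict[int, Optional[int]]
-- ) -> List[int]:
--     """
--     Get all subheadings (all descendants at any level > heading_level) for a given heading.
--
--     Args:
--         heading_index: Index of the heading in all_headings list (0-based)
--         heading_level: Level of the heading
--         all_headings: List of (line_num, level, text) tuples
--         hierarchy: Parent-child mapping from build_heading_hierarchy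
--
--     Returns:
--         List of indices (0-based) for all subheadings (all descendants at any level > heading_level)
--     """
--     subheadings = []
--
--     # Find all headings that are descendants of this heading
--     # A heading is a descendant if it has this heading in its ancestor chain
--     def is_descendant(child_idx: int) -> bool:
--         current = child_idx
--         while current is not None and current in hierarchy:
--             parent = hierarchy[current]
--             if parent == heading_index:
--                 return True
--             current = parent
--         return False
--
--     for idx, (line_num, level, text) in enumerate(all_headings):
--         if idx != heading_index and level > heading_level:
--             if is_descendant(idx):
--                 subheadings.append(idx)
--
--     return subheadings
-- ===== SOURCE B (Python) =====
-- def get_subheadings(heading_index, heading_level, all_headings, hierarchy):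
--     # Memoized variant: every node on a walked ancestor chain is cached, so each
--     # hierarchy node's chain is resolved at most once across the whole loop.
--     memo = {}
--
--     def resolve(idx):
--         chain = []
--         seen = set()
--         cur = idx
--         res = False
--         while cur is not None:
--             if cur in memo:
--                 res = memo[cur]
--                 break
--             if cur in seen or cur not in hierarchy:
--                 break
--             seen.add(cur)
--             chain.append(cur)
--             parent = hierarchy[cur]
--             if parent == heading_index:
--                 res = True
--                 break
--             cur = parent
--         for k in chain:
--             memo[k] = res
--         return res
--
--     result = []
--     for idx, (_line_num, level, _text) in enumerate(all_headings):
--         if idx != heading_index and level > heading_level: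
--             if resolve(idx):
--                 result.append(idx)
--     return result
-- ===== Notes on version B (the rewrite author's own statement) =====
-- stated objective: alternative
-- what changed: B caches the descendant/not-descendant verdict for every node visited on an ancestor walk (plus a visited-set cycle guard), so each hierarchy node's chain is resolved once across the whole loop instead of re-walking the full ancestor chain for every heading; Pre_ excludes hierarchies whose parent map contains a cycle, on which A's ancestor walk loops forever whenever a queried heading's chain enters the cycle without passing heading_index (B's visited-set guard always terminates).
-- outside the precondition, e.g. on get_subheadings(5, 1, [(10, 2, 'a')], {0: 5, 5: 0}): A returns [0], B returns [0]; on get_subheadings(0, 1, [(1, 1, 'h'), (2, 2, 'a')], {1: 0, 3: 3}): A returns [1], B returns [1]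
import Mathlib
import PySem

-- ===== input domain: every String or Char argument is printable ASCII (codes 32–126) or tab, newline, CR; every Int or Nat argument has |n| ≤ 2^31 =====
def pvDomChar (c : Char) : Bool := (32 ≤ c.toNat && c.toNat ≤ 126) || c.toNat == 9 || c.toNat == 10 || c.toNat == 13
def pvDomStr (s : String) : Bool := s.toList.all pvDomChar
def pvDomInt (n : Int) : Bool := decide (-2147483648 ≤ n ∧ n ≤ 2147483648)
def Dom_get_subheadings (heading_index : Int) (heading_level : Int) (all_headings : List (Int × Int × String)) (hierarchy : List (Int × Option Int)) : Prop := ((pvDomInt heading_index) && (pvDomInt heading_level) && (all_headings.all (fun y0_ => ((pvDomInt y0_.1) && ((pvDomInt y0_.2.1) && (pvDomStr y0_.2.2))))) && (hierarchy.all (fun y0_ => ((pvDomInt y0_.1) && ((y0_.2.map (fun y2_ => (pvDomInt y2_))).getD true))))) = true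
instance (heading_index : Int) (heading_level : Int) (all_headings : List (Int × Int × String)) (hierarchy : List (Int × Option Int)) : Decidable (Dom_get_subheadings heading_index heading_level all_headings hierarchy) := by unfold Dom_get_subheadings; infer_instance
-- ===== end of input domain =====

-- B memoizes the descendant verdict per hierarchy node so each node's ancestor chain is resolved once (an alternative algorithm of similar measured cost); return-value equivalence on acyclic hierarchies.

-- ===== PORT A =====
-- A's inner `is_descendant` while-loop; `cur` is Python's `current` (None = none).
-- The fuel `hierarchy.length + 1` only makes the loop total: under Pre_ (acyclic
-- parent map) the walk visits distinct keys, so it never exhausts the fuel.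
def awalk (heading_index : Int) (hierarchy : List (Int × Option Int)) : Nat → Option Int → Bool
  | 0, _ => false
  | fuel + 1, cur =>
    match cur with
    | none => false
    | some c =>
      match (PySem.Dict.mk hierarchy).get? c with
      | none => false
      | some parent =>
        if parent = some heading_index then true
        else awalk heading_index hierarchy fuel parent

def get_subheadings (heading_index : Int) (heading_level : Int) (all_headings : List (Int × Int × String)) (hierarchy : List (Int × Option Int)) : List Int :=
  (PySem.List.enumerate all_headings).foldl
    (fun subheadings e =>
      if e.1 ≠ heading_index ∧ e.2.2.1 > heading_level then
        if awalk heading_index hierarchy (hierarchy.length + 1) (some e.1) then subheadings ++ [e.1]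
        else subheadings
      else subheadings) []

-- ===== PORT B =====
-- B's `resolve` while-loop: walks from `cur`, collecting the chain, until a memo hit,
-- a cycle (`seen`), a missing key, or `parent == heading_index`. The `seen` cycle guard
-- bounds the walk by the number of hierarchy keys, so fuel `hierarchy.length + 1` is exact.
def bwalk (heading_index : Int) (hierarchy : List (Int × Option Int)) (memo : PySem.Dict Int Bool) :
    Nat → List Int → PySem.Set Int → Option Int → (List Int × Bool)
  | 0, chain, _, _ => (chain, false)
  | fuel + 1, chain, seen, cur =>
    match cur with
    | none => (chain, false)
    | some c =>
      match memo.get? c with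
      | some b => (chain, b)
      | none =>
        if PySem.Set.contains seen c then (chain, false)
        else
          match (PySem.Dict.mk hierarchy).get? c with
          | none => (chain, false)
          | some parent =>
            if parent = some heading_index then (chain ++ [c], true)
            else bwalk heading_index hierarchy memo fuel (chain ++ [c]) (PySem.Set.add seen c) parent

-- `resolve idx`, returning (res, memo updated with the walked chain)
def bresolve (heading_index : Int) (hierarchy : List (Int × Option Int)) (memo : PySem.Dict Int Bool) (idx : Int) : Bool × PySem.Dict Int Bool :=
  let w := bwalk heading_index hierarchy memo (hierarchy.length + 1) [] PySem.Set.empty (some idx)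
  (w.2, w.1.foldl (fun m k => m.insert k w.2) memo)

def get_subheadings_alt (heading_index : Int) (heading_level : Int) (all_headings : List (Int × Int × String)) (hierarchy : List (Int × Option Int)) : List Int :=
  ((PySem.List.enumerate all_headings).foldl
    (fun st e =>
      if e.1 ≠ heading_index ∧ e.2.2.1 > heading_level then
        let r := bresolve heading_index hierarchy st.2 e.1
        (if r.1 then st.1 ++ [e.1] else st.1, r.2)
      else st)
    (([] : List Int), (PySem.Dict.empty : PySem.Dict Int Bool))).1

-- ===== PRECONDITION & SPEC =====
-- Pre_ excludes hierarchies whose parent map contains a cycle: on such inputs A's ancestor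
-- walk loops forever whenever a queried heading's chain enters the cycle without passing
-- heading_index, while B's visited-set guard always terminates; the acyclicity is stated as
-- 'every nonempty set of keys contains a key whose parent is outside the set'.
-- (This also excludes some cyclic maps on which every queried chain happens to terminate
-- and A still returns — cited in claim.json.)
def Pre_get_subheadings (heading_index : Int) (heading_level : Int) (all_headings : List (Int × Int × String)) (hierarchy : List (Int × Option Int)) : Prop :=
  ∀ S ∈ ((hierarchy.map Prod.fst).dedup).sublists, S ≠ [] →
    ∃ k ∈ S, ¬ ∃ p ∈ S, (PySem.Dict.mk hierarchy).get? k = some (some p)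
instance (heading_index : Int) (heading_level : Int) (all_headings : List (Int × Int × String)) (hierarchy : List (Int × Option Int)) : Decidable (Pre_get_subheadings heading_index heading_level all_headings hierarchy) := by unfold Pre_get_subheadings; infer_instance

def pvWitness_get_subheadings : Int × Int × (List (Int × Int × String)) × (List (Int × Option Int)) :=
  (0, 1, [(1, 2, "a"), (5, 3, "b")], [(1, some 0)])

def Spec_get_subheadings (heading_index : Int) (heading_level : Int) (all_headings : List (Int × Int × String)) (hierarchy : List (Int × Option Int)) (out : List Int) : Prop := out = get_subheadings_alt heading_index heading_level all_headings hierarchy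
instance (heading_index : Int) (heading_level : Int) (all_headings : List (Int × Int × String)) (hierarchy : List (Int × Option Int)) (out : List Int) : Decidable (Spec_get_subheadings heading_index heading_level all_headings hierarchy out) := by unfold Spec_get_subheadings; infer_instance

-- ===== CLAIM (what is proved, stated in full; the proofs are below) =====
def Claim_equal_get_subheadings : Prop := ∀ (heading_index : Int) (heading_level : Int) (all_headings : List (Int × Int × String)) (hierarchy : List (Int × Option Int)), Dom_get_subheadings heading_index heading_level all_headings hierarchy → Pre_get_subheadings heading_index heading_level all_headings hierarchy → Spec_get_subheadings heading_index heading_level all_headings hierarchy (get_subheadings heading_index heading_level all_headings hierarchy)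

-- ===== LEMMAS AND PROOFS =====

-- the parent-edge relation of the hierarchy dict
def pvRel (hierarchy : List (Int × Option Int)) (x y : Int) : Prop :=
  (PySem.Dict.mk hierarchy).get? x = some (some y)

-- number of distinct keys
def pvD (hierarchy : List (Int × Option Int)) : Nat := ((hierarchy.map Prod.fst).dedup).length

-- A's is_descendant result at the canonical fuel
def pvARes (heading_index : Int) (hierarchy : List (Int × Option Int)) (c : Int) : Bool :=
  awalk heading_index hierarchy (hierarchy.length + 1) (some c)

def pvRO (heading_index : Int) (hierarchy : List (Int × Option Int)) : Option Int → Bool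
  | none => false
  | some c => pvARes heading_index hierarchy c

lemma awalk_none (hi : Int) (h : List (Int × Option Int)) (f : Nat) : awalk hi h f none = false := by
  cases f <;> simp [awalk]

lemma get?_mk_mem (h : List (Int × Option Int)) (c : Int) (v : Option Int)
    (hl : (PySem.Dict.mk h).get? c = some v) : (c, v) ∈ h := by
  induction h with
  | nil => simp [PySem.Dict.get?] at hl
  | cons e t ih =>
    obtain ⟨k, w⟩ := e
    rw [PySem.Dict.get?_mk_cons] at hl
    by_cases hk : k = c
    · subst hk
      simp at hl
      simp [hl]
    · simp [hk] at hl
      exact List.mem_cons_of_mem _ (ih hl)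

lemma mem_keys_of_get? (h : List (Int × Option Int)) (c : Int) (v : Option Int)
    (hl : (PySem.Dict.mk h).get? c = some v) : c ∈ h.map Prod.fst :=
  List.mem_map.mpr ⟨(c, v), get?_mk_mem h c v hl, rfl⟩

lemma mem_keys_of_rel (h : List (Int × Option Int)) (x y : Int)
    (hr : pvRel h x y) : x ∈ h.map Prod.fst :=
  mem_keys_of_get? h x (some y) hr

-- acyclicity (Pre_) refutes any 'closed' set of nodes, each with its parent inside the set
lemma no_closed (hi lvl : Int) (ah : List (Int × Int × String)) (h : List (Int × Option Int))
    (hPre : Pre_get_subheadings hi lvl ah h) (T : List Int) (hne : T ≠ [])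
    (hcl : ∀ k ∈ T, ∃ p ∈ T, pvRel h k p) : False := by
  classical
  set S := ((h.map Prod.fst).dedup).filter (fun x => decide (x ∈ T)) with hS
  have hmemS : ∀ x, x ∈ S ↔ x ∈ T := by
    intro x
    constructor
    · intro hx
      have := List.mem_filter.mp hx
      simpa using this.2
    · intro hx
      obtain ⟨p, _, hp⟩ := hcl x hx
      refine List.mem_filter.mpr ⟨List.mem_dedup.mpr (mem_keys_of_rel h x p hp), by simpa⟩
  have hSsub : S ∈ ((h.map Prod.fst).dedup).sublists :=
    List.mem_sublists.mpr List.filter_sublist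
  have hSne : S ≠ [] := by
    obtain ⟨t, ht⟩ := List.exists_mem_of_ne_nil T hne
    intro hnil
    have := (hmemS t).mpr ht
    simp [hnil] at this
  obtain ⟨k, hkS, hknot⟩ := hPre S hSsub hSne
  obtain ⟨p, hpT, hp⟩ := hcl k ((hmemS k).mp hkS)
  exact hknot ⟨p, (hmemS p).mpr hpT, hp⟩

-- a nodup list of keys has at most pvD elements
lemma nodup_len_le (h : List (Int × Option Int)) (l : List Int)
    (hnd : l.Nodup) (hk : ∀ x ∈ l, x ∈ h.map Prod.fst) : l.length ≤ pvD h := by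
  classical
  have h1 : l.toFinset.card = l.length := List.toFinset_card_of_nodup hnd
  have h2 : ((h.map Prod.fst).dedup).toFinset.card = pvD h :=
    List.toFinset_card_of_nodup (List.nodup_dedup _)
  have hsub : l.toFinset ⊆ ((h.map Prod.fst).dedup).toFinset := by
    intro x hx
    exact List.mem_toFinset.mpr (List.mem_dedup.mpr (hk x (List.mem_toFinset.mp hx)))
  have := Finset.card_le_card hsub
  omega

-- every element of a pvRel-chain except possibly the last is a key
lemma chain_mem_keys (h : List (Int × Option Int)) (path : List Int) (c : Int)
    (hch : List.IsChain (pvRel h) (path ++ [c])) : ∀ x ∈ path, x ∈ h.map Prod.fst := by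
  intro x hx
  obtain ⟨i, hi, hxi⟩ := List.getElem_of_mem hx
  have hlt : i + 1 < (path ++ [c]).length := by simp; omega
  have hrel := List.isChain_iff_getElem.mp hch i (by simpa using hlt)
  have hxe : (path ++ [c])[i] = x := by
    rw [List.getElem_append_left (by omega)]; exact hxi
  exact mem_keys_of_rel h x _ (by rw [hxe] at hrel; exact hrel)

-- extending a walk by the tip's parent keeps it a chain / keeps it nodup
lemma pvChainSnoc {h : List (Int × Option Int)} {path : List Int} {c p : Int}
    (hch : List.IsChain (pvRel h) (path ++ [c])) (hrel : pvRel h c p) :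
    List.IsChain (pvRel h) ((path ++ [c]) ++ [p]) := by
  refine List.IsChain.append hch (by simp) ?_
  intro x hx y hy
  rw [List.getLast?_concat] at hx
  simp at hx hy
  subst hx; subst hy
  exact hrel

lemma pvNodupConcat {l : List Int} {p : Int} (hnd : l.Nodup) (hp : p ∉ l) : (l ++ [p]).Nodup := by
  simp only [List.nodup_append, List.nodup_singleton, true_and]
  refine ⟨hnd, ?_⟩
  intro a ha b hb
  simp at hb
  subst hb
  intro hab
  exact hp (hab ▸ ha)

-- under Pre_, the parent of the tip of a nodup walk is fresh: it closes no cycle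
lemma fresh_parent (hi lvl : Int) (ah : List (Int × Int × String)) (h : List (Int × Option Int))
    (hPre : Pre_get_subheadings hi lvl ah h) (path : List Int) (c p : Int)
    (hch : List.IsChain (pvRel h) (path ++ [c])) (hrel : pvRel h c p) :
    p ∉ path ++ [c] := by
  intro hp
  obtain ⟨l1, l2, hsplit⟩ := List.append_of_mem hp
  refine no_closed hi lvl ah h hPre (p :: l2) (by simp) ?_
  have hchT : List.IsChain (pvRel h) (p :: l2) := by
    have := hsplit ▸ hch
    exact (List.isChain_append.mp this).2.1
  have hlast : (p :: l2).getLast? = some c := by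
    have h1 : (path ++ [c]).getLast? = some c := List.getLast?_concat
    have h2 : (l1 ++ (p :: l2)).getLast? = (p :: l2).getLast? :=
      List.getLast?_append_of_ne_nil _ (by simp)
    rw [hsplit, h2] at h1
    exact h1
  intro k hk
  obtain ⟨i, hilt, hki⟩ := List.getElem_of_mem hk
  by_cases hend : i + 1 < (p :: l2).length
  · exact ⟨(p :: l2)[i + 1], List.getElem_mem _,
      by rw [← hki]; exact List.isChain_iff_getElem.mp hchT i (by omega)⟩
  · have hieq : i = (p :: l2).length - 1 := by omega
    have hkc : k = c := by
      have h5 : (p :: l2)[i]? = some c := by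
        rw [hieq, ← List.getLast?_eq_getElem?]
        exact hlast
      rw [List.getElem?_eq_getElem hilt] at h5
      rw [← hki]
      exact Option.some.inj h5
    exact ⟨p, List.mem_cons_self, hkc ▸ hrel⟩

-- A's walk is fuel-independent once the fuel covers the remaining distinct keys
lemma awalk_stab (hi lvl : Int) (ah : List (Int × Int × String)) (h : List (Int × Option Int))
    (hPre : Pre_get_subheadings hi lvl ah h) :
    ∀ (f g : Nat) (path : List Int) (cur : Option Int),
      (∀ c, cur = some c → List.IsChain (pvRel h) (path ++ [c]) ∧ (path ++ [c]).Nodup) →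
      pvD h + 1 - path.length ≤ f → pvD h + 1 - path.length ≤ g →
      awalk hi h f cur = awalk hi h g cur := by
  intro f
  induction f with
  | zero =>
    intro g path cur hinv hf _
    cases cur with
    | none => rw [awalk_none, awalk_none]
    | some c =>
      obtain ⟨hch, hnd⟩ := hinv c rfl
      have hplen : path.length ≤ pvD h :=
        nodup_len_le h path (List.Nodup.of_append_left hnd) (chain_mem_keys h path c hch)
      omega
  | succ f ih =>
    intro g path cur hinv hf hg
    cases cur with
    | none => rw [awalk_none, awalk_none]
    | some c =>
      obtain ⟨hch, hnd⟩ := hinv c rfl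
      have hplen : path.length ≤ pvD h :=
        nodup_len_le h path (List.Nodup.of_append_left hnd) (chain_mem_keys h path c hch)
      obtain ⟨g, rfl⟩ : ∃ g', g = g' + 1 := ⟨g - 1, by omega⟩
      simp only [awalk]
      cases hl : (PySem.Dict.mk h).get? c with
      | none => rfl
      | some parent =>
        by_cases hpar : parent = some hi
        · simp [hpar]
        · simp only [if_neg hpar]
          cases parent with
          | none => rw [awalk_none, awalk_none]
          | some p =>
            have hrel : pvRel h c p := hl
            have hfresh := fresh_parent hi lvl ah h hPre path c p hch hrel
            have hckey : c ∈ h.map Prod.fst := mem_keys_of_rel h c p hrel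
            have hlen2 : (path ++ [c]).length ≤ pvD h := by
              refine nodup_len_le h _ hnd ?_
              intro x hx
              rcases List.mem_append.mp hx with hx | hx
              · exact chain_mem_keys h path c hch x hx
              · simp at hx; subst hx; exact hckey
            refine ih g (path ++ [c]) (some p) ?_ ?_ ?_
            · intro c' hc'
              cases hc'
              exact ⟨pvChainSnoc hch hrel, pvNodupConcat hnd hfresh⟩
            · simp at hlen2 ⊢; omega
            · simp at hlen2 ⊢; omega

-- the memoization invariant: every cached verdict is A's verdict
def pvInv (hi : Int) (h : List (Int × Option Int)) (memo : PySem.Dict Int Bool) : Prop :=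
  ∀ (k : Int) (b : Bool), memo.get? k = some b → b = pvARes hi h k

lemma bwalk_spec (hi lvl : Int) (ah : List (Int × Int × String)) (h : List (Int × Option Int))
    (hPre : Pre_get_subheadings hi lvl ah h)
    (memo : PySem.Dict Int Bool) (hInv : pvInv hi h memo) :
    ∀ (fuel : Nat) (chain : List Int) (seen : PySem.Set Int) (cur : Option Int),
      (∀ x : Int, x ∈ seen ↔ x ∈ chain) →
      (∀ c, cur = some c → List.IsChain (pvRel h) (chain ++ [c]) ∧ (chain ++ [c]).Nodup) →
      pvD h + 1 - chain.length ≤ fuel →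
      (bwalk hi h memo fuel chain seen cur).2 = pvRO hi h cur ∧
      (∀ c ∈ (bwalk hi h memo fuel chain seen cur).1,
        c ∈ chain ∨ pvARes hi h c = pvRO hi h cur) := by
  intro fuel
  induction fuel with
  | zero =>
    intro chain seen cur hseen hinv hf
    cases cur with
    | none => exact ⟨rfl, fun c hc => Or.inl hc⟩
    | some c =>
      obtain ⟨hch, hnd⟩ := hinv c rfl
      have hplen : chain.length ≤ pvD h :=
        nodup_len_le h chain (List.Nodup.of_append_left hnd) (chain_mem_keys h chain c hch)
      omega
  | succ fuel ih =>
    intro chain seen cur hseen hinv hf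
    cases cur with
    | none =>
      simp only [bwalk]
      exact ⟨rfl, fun c hc => Or.inl hc⟩
    | some c =>
      obtain ⟨hch, hnd⟩ := hinv c rfl
      have hplen : chain.length ≤ pvD h :=
        nodup_len_le h chain (List.Nodup.of_append_left hnd) (chain_mem_keys h chain c hch)
      simp only [bwalk]
      cases hm : memo.get? c with
      | some b =>
        simp only [pvRO]
        exact ⟨hInv c b hm, fun c' hc' => Or.inl hc'⟩
      | none =>
        have hnotchain : c ∉ chain := by
          have := (List.nodup_append.mp hnd).2.2
          intro hc
          exact this c hc c (by simp) rfl
        have hcont : PySem.Set.contains seen c = false := by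
          simp [PySem.Set.contains]
          intro hcs
          exact hnotchain ((hseen c).mp hcs)
        rw [hcont]
        simp only [Bool.false_eq_true, if_false]
        cases hl : (PySem.Dict.mk h).get? c with
        | none =>
          constructor
          · simp [pvRO, pvARes, awalk, hl]
          · exact fun c' hc' => Or.inl hc'
        | some parent =>
          have hckey : c ∈ h.map Prod.fst := mem_keys_of_get? h c parent hl
          have hlen2 : (chain ++ [c]).length ≤ pvD h := by
            refine nodup_len_le h _ hnd ?_
            intro x hx
            rcases List.mem_append.mp hx with hx | hx
            · exact chain_mem_keys h chain c hch x hx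
            · simp at hx; subst hx; exact hckey
          by_cases hpar : parent = some hi
          · simp only [if_pos hpar]
            constructor
            · simp [pvRO, pvARes, awalk, hl, hpar]
            · intro c' hc'
              rcases List.mem_append.mp hc' with hc' | hc'
              · exact Or.inl hc'
              · simp at hc'
                subst hc'
                right
                simp [pvRO, pvARes, awalk, hl, hpar]
          · simp only [if_neg hpar]
            have hD : pvD h ≤ h.length := by
              have h1 : pvD h ≤ (h.map Prod.fst).length := (List.dedup_sublist _).length_le
              simpa using h1
            have step : pvARes hi h c = awalk hi h h.length parent := by
              simp only [pvARes, awalk, hl, if_neg hpar]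
            have hRc : pvRO hi h (some c) = pvRO hi h parent := by
              show pvARes hi h c = pvRO hi h parent
              rw [step]
              cases parent with
              | none => rw [awalk_none]; rfl
              | some p =>
                have hrel : pvRel h c p := hl
                have hfresh := fresh_parent hi lvl ah h hPre chain c p hch hrel
                have hstab : awalk hi h h.length (some p) = awalk hi h (h.length + 1) (some p) := by
                  refine awalk_stab hi lvl ah h hPre h.length (h.length + 1) (chain ++ [c]) (some p) ?_ ?_ ?_
                  · intro c' hc'
                    cases hc'
                    exact ⟨pvChainSnoc hch hrel, pvNodupConcat hnd hfresh⟩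
                  · simp at hlen2 ⊢; omega
                  · simp at hlen2 ⊢; omega
                exact hstab
            cases parent with
            | none =>
              have hbw : bwalk hi h memo fuel (chain ++ [c]) (PySem.Set.add seen c) none = (chain ++ [c], false) := by
                cases fuel <;> simp [bwalk]
              rw [hbw]
              refine ⟨by rw [hRc]; rfl, ?_⟩
              intro c' hc'
              rcases List.mem_append.mp hc' with hc' | hc'
              · exact Or.inl hc'
              · simp at hc'
                subst hc'
                right
                rw [step, awalk_none, hRc]; rfl
            | some p =>
              have hrel : pvRel h c p := hl
              have hfresh := fresh_parent hi lvl ah h hPre chain c p hch hrel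
              have hseen' : ∀ x : Int, x ∈ PySem.Set.add seen c ↔ x ∈ chain ++ [c] := by
                intro x
                rw [PySem.Set.mem_add]
                simp only [List.mem_append, List.mem_singleton, hseen x]
              have hinv' : ∀ c', some p = some c' →
                  List.IsChain (pvRel h) ((chain ++ [c]) ++ [c']) ∧ ((chain ++ [c]) ++ [c']).Nodup := by
                intro c' hc'
                cases hc'
                exact ⟨pvChainSnoc hch hrel, pvNodupConcat hnd hfresh⟩
              have hfc : pvD h + 1 - (chain ++ [c]).length ≤ fuel := by
                simp at hlen2 ⊢; omega
              obtain ⟨hres, hchn⟩ := ih (chain ++ [c]) (PySem.Set.add seen c) (some p) hseen' hinv' hfc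
              refine ⟨hres.trans hRc.symm, ?_⟩
              intro c' hc'
              rcases hchn c' hc' with hc' | hc'
              · rcases List.mem_append.mp hc' with hc' | hc'
                · exact Or.inl hc'
                · simp at hc'
                  subst hc'
                  right
                  rfl
              · right
                exact hc'.trans hRc.symm

lemma pvInv_foldl (hi : Int) (h : List (Int × Option Int)) (b : Bool) :
    ∀ (l : List Int) (memo : PySem.Dict Int Bool), pvInv hi h memo →
      (∀ c ∈ l, pvARes hi h c = b) →
      pvInv hi h (l.foldl (fun m k => m.insert k b) memo) := by
  intro l
  induction l with
  | nil => intro memo hInv _; exact hInv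
  | cons x0 t ih =>
    intro memo hInv hall
    simp only [List.foldl_cons]
    apply ih
    · intro kk bk hk
      rw [PySem.Dict.get?_insert] at hk
      split at hk
      · rename_i hkx
        cases hk
        rw [hkx]
        exact (hall x0 List.mem_cons_self).symm
      · exact hInv kk bk hk
    · exact fun c hc => hall c (List.mem_cons_of_mem _ hc)

lemma bresolve_spec (hi lvl : Int) (ah : List (Int × Int × String)) (h : List (Int × Option Int))
    (hPre : Pre_get_subheadings hi lvl ah h)
    (memo : PySem.Dict Int Bool) (hInv : pvInv hi h memo) (idx : Int) :
    (bresolve hi h memo idx).1 = pvARes hi h idx ∧ pvInv hi h (bresolve hi h memo idx).2 := by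
  have hD : pvD h ≤ h.length := by
    have h1 : pvD h ≤ (h.map Prod.fst).length := (List.dedup_sublist _).length_le
    simpa using h1
  obtain ⟨hres, hch⟩ := bwalk_spec hi lvl ah h hPre memo hInv (h.length + 1) [] PySem.Set.empty (some idx)
    (by intro x; simp [PySem.Set.empty])
    (by intro c hc; cases hc; exact ⟨by simp, by simp⟩)
    (by simp; omega)
  unfold bresolve
  constructor
  · simpa [pvRO] using hres
  · apply pvInv_foldl hi h _ _ memo hInv
    intro c hc
    rcases hch c hc with hc' | hc'
    · simp at hc'
    · rw [hc', hres]

lemma fold_eq (hi lvl : Int) (ah : List (Int × Int × String)) (h : List (Int × Option Int))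
    (hPre : Pre_get_subheadings hi lvl ah h) :
    ∀ (l : List (Int × Int × Int × String)) (acc : List Int) (memo : PySem.Dict Int Bool),
      pvInv hi h memo →
      (l.foldl
        (fun st e =>
          if e.1 ≠ hi ∧ e.2.2.1 > lvl then
            let r := bresolve hi h st.2 e.1
            (if r.1 then st.1 ++ [e.1] else st.1, r.2)
          else st)
        (acc, memo)).1 =
      l.foldl
        (fun subheadings e =>
          if e.1 ≠ hi ∧ e.2.2.1 > lvl then
            if awalk hi h (h.length + 1) (some e.1) then subheadings ++ [e.1]
            else subheadings
          else subheadings) acc := by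
  intro l
  induction l with
  | nil => intro acc memo _; rfl
  | cons e t ih =>
    intro acc memo hInv
    simp only [List.foldl_cons]
    by_cases hcond : e.1 ≠ hi ∧ e.2.2.1 > lvl
    · obtain ⟨hres, hInv'⟩ := bresolve_spec hi lvl ah h hPre memo hInv e.1
      simp only [if_pos hcond]
      rw [ih _ _ hInv']
      congr 1
      rw [hres]
      rfl
    · simp only [if_neg hcond]
      exact ih acc memo hInv

-- ===== VERDICT (by name: the statement is the Claim_ definition above) =====
theorem get_subheadings_spec : Claim_equal_get_subheadings := by
  intro hi lvl ah h _ hPre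
  unfold Spec_get_subheadings get_subheadings get_subheadings_alt
  exact (fold_eq hi lvl ah h hPre (PySem.List.enumerate ah) [] PySem.Dict.empty
    (by intro k b hk; simp [PySem.Dict.get?, PySem.Dict.empty] at hk)).symm
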